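-- pv_equiv track=rewrite | github.com/Andreal2000/advent-of-code | 2017/24/electromagnetic_moat.py | bridges
-- ===== SOURCE A (Python) =====
-- def bridges(components, start=0):
--     result = []
--     for i, component in enumerate(components):
--         if start in component:
--             next_start = component[0] if component[1] == start else component[1]
--             next_components = components[:i] + components[i + 1 :]
--             next_bridges = bridges(next_components, next_start)
--             if next_bridges:
--                 for bridge in next_bridges:
--                     result.append([component] + bridge)
--             else:
--                 result.append([component])
--
--     return result
-- ===== SOURCE B (Python) =====
-- def bridges(components, start=0):
--     result = []
--
--     def helper(remaining, s, prefix):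
--         extended = False
--         for i, component in enumerate(remaining):
--             if s in component:
--                 extended = True
--                 next_start = component[0] if component[1] == s else component[1]
--                 helper(remaining[:i] + remaining[i + 1:], next_start, prefix + [component])
--         if not extended and prefix:
--             result.append(prefix)
--
--     helper(components, start, [])
--     return result
-- ===== Notes on version B (the rewrite author's own statement) =====
-- stated objective: alternative
-- what changed: Replaces A's bottom-up recursion (build sub-bridges, then prepend the component to each, or emit the singleton) with a top-down accumulator-passing DFS that threads the path prefix downward and appends it to a shared result list only at leaves (when no component can extend it).
import Mathlib
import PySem

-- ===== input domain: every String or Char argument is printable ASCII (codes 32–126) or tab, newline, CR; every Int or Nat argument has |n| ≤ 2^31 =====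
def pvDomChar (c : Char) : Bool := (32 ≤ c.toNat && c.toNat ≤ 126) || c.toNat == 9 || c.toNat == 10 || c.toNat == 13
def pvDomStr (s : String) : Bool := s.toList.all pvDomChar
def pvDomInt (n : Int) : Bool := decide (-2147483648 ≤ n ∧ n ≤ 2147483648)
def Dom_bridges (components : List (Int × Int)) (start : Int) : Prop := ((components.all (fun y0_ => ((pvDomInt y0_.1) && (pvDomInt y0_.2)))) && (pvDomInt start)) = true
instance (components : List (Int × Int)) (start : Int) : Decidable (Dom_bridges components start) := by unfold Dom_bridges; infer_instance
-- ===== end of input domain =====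

-- B rewrites A's bottom-up recursion (prepend component to every sub-bridge) as a top-down
-- accumulator-passing DFS that threads the path prefix and emits it only at leaves (alternative decomposition).

-- ===== PORT A =====
-- A's `for i, component in enumerate(components)` with `components[:i] + components[i+1:]` is
-- modelled by threading the already-visited prefix `seen`, so `seen ++ t` is that slice sum.
mutual
def bridges (components : List (Int × Int)) (start : Int) : List (List (Int × Int)) :=
  bridgesLoop [] components start []
termination_by (components.length, 1, 0)

def bridgesLoop (seen todo : List (Int × Int)) (start : Int)
    (result : List (List (Int × Int))) : List (List (Int × Int)) :=
  match todo with
  | [] => result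
  | c :: t =>
    let result' :=
      if c.1 = start ∨ c.2 = start then
        let nextStart := if c.2 = start then c.1 else c.2
        let nextBridges := bridges (seen ++ t) nextStart
        if nextBridges.isEmpty then result ++ [[c]]
        else result ++ nextBridges.map (fun b => c :: b)
      else result
    bridgesLoop (seen ++ [c]) t start result'
termination_by (seen.length + todo.length, 0, todo.length)
decreasing_by
  all_goals (simp [Prod.lex_def]; try omega)
end

-- ===== PORT B =====
-- Source B's helper(remaining, s, prefix): the inner `for i, component in enumerate(remaining)` is
-- altLoop (same seen/todo threading); it carries the shared `result` list and the `extended` flag,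
-- and helper appends `prefix` to result after the loop when nothing extended it.
mutual
def altHelper (remaining : List (Int × Int)) (s : Int) (pre : List (Int × Int))
    (result : List (List (Int × Int))) : List (List (Int × Int)) :=
  let p := altLoop [] remaining s pre result false
  if !p.2 && !pre.isEmpty then p.1 ++ [pre] else p.1
termination_by (remaining.length, 1, 0)

def altLoop (seen todo : List (Int × Int)) (s : Int) (pre : List (Int × Int))
    (result : List (List (Int × Int))) (ext : Bool) :
    List (List (Int × Int)) × Bool :=
  match todo with
  | [] => (result, ext)
  | c :: t =>
    if c.1 = s ∨ c.2 = s then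
      let nextStart := if c.2 = s then c.1 else c.2
      altLoop (seen ++ [c]) t s pre (altHelper (seen ++ t) nextStart (pre ++ [c]) result) true
    else altLoop (seen ++ [c]) t s pre result ext
termination_by (seen.length + todo.length, 0, todo.length)
decreasing_by
  all_goals (simp [Prod.lex_def]; try omega)
end

def bridges_alt (components : List (Int × Int)) (start : Int) : List (List (Int × Int)) :=
  altHelper components start [] []

-- ===== PRECONDITION & SPEC =====
def Spec_bridges (components : List (Int × Int)) (start : Int) (out : List (List (Int × Int))) : Prop := out = bridges_alt components start
instance (components : List (Int × Int)) (start : Int) (out : List (List (Int × Int))) : Decidable (Spec_bridges components start out) := by unfold Spec_bridges; infer_instance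

-- ===== CLAIM (what is proved, stated in full; the proofs are below) =====
def Claim_equal_bridges : Prop := ∀ (components : List (Int × Int)) (start : Int), Dom_bridges components start → Spec_bridges components start (bridges components start)

-- ===== LEMMAS AND PROOFS =====

/-- `true` iff some component of `cs` contains `s` (Python `start in component` for some element). -/
def hasMatch (s : Int) (cs : List (Int × Int)) : Bool :=
  cs.any (fun c => c.1 == s || c.2 == s)

/-- A's loop only appends to `result`. -/
theorem bridgesLoop_acc (todo : List (Int × Int)) :
    ∀ (seen : List (Int × Int)) (s : Int) (r : List (List (Int × Int))),
    bridgesLoop seen todo s r = r ++ bridgesLoop seen todo s [] := by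
  induction todo with
  | nil => intro seen s r; simp [bridgesLoop]
  | cons c t ih =>
    intro seen s r
    simp only [bridgesLoop]
    have key : ∀ (x y : List (List (Int × Int))),
        bridgesLoop (seen ++ [c]) t s (y ++ x) = y ++ bridgesLoop (seen ++ [c]) t s x := by
      intro x y
      rw [ih (seen ++ [c]) s (y ++ x), ih (seen ++ [c]) s x, List.append_assoc]
    split_ifs with h h2 <;> (try simp only [List.nil_append]) <;>
      first
        | exact key _ r
        | simpa using key [] r

/-- If no component contains `s`, A's loop adds nothing. -/
theorem bridgesLoop_no_match (todo : List (Int × Int)) :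
    ∀ (seen : List (Int × Int)) (s : Int) (r : List (List (Int × Int))),
    hasMatch s todo = false → bridgesLoop seen todo s r = r := by
  induction todo with
  | nil => intro seen s r _; simp [bridgesLoop]
  | cons c t ih =>
    intro seen s r h
    simp [hasMatch, List.any_cons] at h
    simp only [bridgesLoop]
    rw [if_neg (by rintro (h' | h'); exacts [h.1.1 h', h.1.2 h'])]
    exact ih _ s r (by simp [hasMatch]; exact h.2)

/-- If some component contains `s`, A's loop emits at least one bridge. -/
theorem bridgesLoop_match_ne_nil (todo : List (Int × Int)) :
    ∀ (seen : List (Int × Int)) (s : Int),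
    hasMatch s todo = true → bridgesLoop seen todo s [] ≠ [] := by
  induction todo with
  | nil => intro seen s h; simp [hasMatch] at h
  | cons c t ih =>
    intro seen s h
    simp only [bridgesLoop]
    by_cases hc : c.1 = s ∨ c.2 = s
    · rw [if_pos hc]
      by_cases h2 : (bridges (seen ++ t) (if c.2 = s then c.1 else c.2)).isEmpty
      · rw [if_pos h2, bridgesLoop_acc]; simp
      · rw [if_neg h2, bridgesLoop_acc]
        simp only [List.isEmpty_iff] at h2
        simp [h2]
    · rw [if_neg hc]
      apply ih
      simp only [hasMatch, List.any_cons, Bool.or_eq_true, beq_iff_eq] at h ⊢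
      rcases h with h | h
      · exact absurd h hc
      · exact h
  
theorem bridges_eq_nil_iff (cs : List (Int × Int)) (s : Int) :
    bridges cs s = [] ↔ hasMatch s cs = false := by
  constructor
  · intro h
    by_contra hb
    exact bridgesLoop_match_ne_nil cs [] s (by simpa using hb) (by simpa [bridges] using h)
  · intro h
    simpa [bridges] using bridgesLoop_no_match cs [] s [] h

/-- Main invariant, by strong induction on the number of remaining components:
    B's loop produces exactly A's bridges for the remaining components, each with the
    current prefix prepended, and reports whether anything matched. -/
theorem altLoop_core : ∀ (n : Nat) (s : Int) (p todo seen : List (Int × Int))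
    (r : List (List (Int × Int))) (e : Bool), seen.length + todo.length = n →
    altLoop seen todo s p r e =
      (r ++ (bridgesLoop seen todo s []).map (fun b => p ++ b), e || hasMatch s todo) := by
  intro n
  induction n using Nat.strong_induction_on with
  | _ n IH =>
  -- helper form of the IH: B's helper on strictly fewer components
  have hHelp : ∀ (cs : List (Int × Int)) (s' : Int) (p' : List (Int × Int))
      (r' : List (List (Int × Int))), cs.length < n →
      altHelper cs s' p' r' = r' ++
        (if hasMatch s' cs then (bridges cs s').map (fun b => p' ++ b)
         else if p' = [] then [] else [p']) := by
    intro cs s' p' r' hlt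
    simp only [altHelper]
    rw [IH cs.length hlt s' p' cs [] r' false (by simp)]
    simp only [bridges]
    by_cases hm : hasMatch s' cs = true
    · rw [hm]; simp
    · have hm' : hasMatch s' cs = false := eq_false_of_ne_true hm
      rw [hm', bridgesLoop_no_match cs [] s' [] hm']
      by_cases hp : p' = []
      · simp [hp]
      · simp [hp]
  intro s p todo
  induction todo with
  | nil => intro seen r e h; simp [altLoop, bridgesLoop, hasMatch]
  | cons c t iht =>
    intro seen r e h
    simp only [altLoop, bridgesLoop]
    by_cases hc : c.1 = s ∨ c.2 = s
    · rw [if_pos hc, if_pos hc]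
      rw [iht (seen ++ [c]) _ true (by simp at h ⊢; omega)]
      rw [hHelp (seen ++ t) _ (p ++ [c]) r (by simp at h ⊢; omega)]
      rw [bridgesLoop_acc t (seen ++ [c]) s]
      have hmatch : hasMatch s (c :: t) = true := by
        simp [hasMatch, List.any_cons]
        rcases hc with hc | hc
        · exact Or.inl (Or.inl hc)
        · exact Or.inl (Or.inr hc)
      rw [hmatch]
      by_cases h2 : (bridges (seen ++ t) (if c.2 = s then c.1 else c.2)).isEmpty
      · have hnil := List.isEmpty_iff.mp h2
        have hm : hasMatch (if c.2 = s then c.1 else c.2) (seen ++ t) = false :=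
          (bridges_eq_nil_iff _ _).mp hnil
        simp only [hm, hnil, List.map_nil, List.append_nil]
        simp
        rw [bridgesLoop_acc t (seen ++ [c]) s [[c]]]
        simp
      · have hne : bridges (seen ++ t) (if c.2 = s then c.1 else c.2) ≠ [] := by
          simpa [List.isEmpty_iff] using h2
        have hm : hasMatch (if c.2 = s then c.1 else c.2) (seen ++ t) = true := by
          by_contra hb
          exact hne ((bridges_eq_nil_iff _ _).mpr (eq_false_of_ne_true hb))
        simp only [h2, hm]
        simp
        rw [bridgesLoop_acc t (seen ++ [c]) s
          (List.map (fun b => c :: b) (bridges (seen ++ t) (if c.2 = s then c.1 else c.2)))]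
        simp [Function.comp]
    · rw [if_neg hc, if_neg hc]
      rw [iht (seen ++ [c]) r e (by simp at h ⊢; omega)]
      have hc1 : ¬c.1 = s := fun h' => hc (Or.inl h')
      have hc2 : ¬c.2 = s := fun h' => hc (Or.inr h')
      have e1 : (c.1 == s) = false := by simp [hc1]
      have e2 : (c.2 == s) = false := by simp [hc2]
      simp [hasMatch, List.any_cons, e1, e2]

/-- B's helper emits exactly A's bridges with the prefix prepended, or the prefix itself
    when nothing matches (and the prefix is non-empty). -/
theorem altHelper_spec (cs : List (Int × Int)) (s : Int) (p : List (Int × Int))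
    (r : List (List (Int × Int))) :
    altHelper cs s p r = r ++
      (if hasMatch s cs = true then (bridges cs s).map (fun b => p ++ b)
       else if p = [] then [] else [p]) := by
  simp only [altHelper]
  rw [altLoop_core cs.length s p cs [] r false (by simp)]
  simp only [bridges]
  by_cases hm : hasMatch s cs = true
  · rw [hm]; simp
  · have hm' := eq_false_of_ne_true hm
    rw [hm', bridgesLoop_no_match cs [] s [] hm']
    by_cases hp : p = []
    · simp [hp]
    · simp [hp]

-- ===== VERDICT (by name: the statement is the Claim_ definition above) =====
theorem bridges_spec : Claim_equal_bridges := by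
  intro components start _
  show bridges components start = bridges_alt components start
  simp only [bridges_alt]
  rw [altHelper_spec]
  by_cases hm : hasMatch start components = true
  · simp [hm]
  · simp [hm, (bridges_eq_nil_iff _ _).mpr (eq_false_of_ne_true hm)]
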